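-- pv_equiv track=rewrite | github.com/smb-220/Problem-of-the-Day | Problem of the Day(06-01-2024).py | sumOfPowers
-- ===== SOURCE A (Python) =====
-- def sumOfPowers(a : int, b : int) -> int:
--
--     spf = [i for i in range(b+1)]
--     for i in range(2, b+1):
--         if spf[i] == i:
--             for j in range(i*i, b+1, i):
--                 if spf[j] == j:
--                     spf[j] = i
--
--     ans = 0
--     for i in range(a, b+1):
--         cnt = 0
--         while i > 1:
--             cnt += 1
--             i //= spf[i]
--
--         ans += cnt
--
--     return ans
-- ===== SOURCE B (Python) =====
-- def sumOfPowers(a: int, b: int) -> int: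
--     # Same smallest-prime-factor sieve, but the per-number factorization
--     # while-loop is replaced by a single incremental DP pass:
--     # omega[i] = omega[i // spf[i]] + 1, then a direct sum over [max(a,2), b].
--     n = b + 1
--     spf = list(range(n)) if n > 0 else []
--     for i in range(2, n):
--         if spf[i] == i:
--             for j in range(i * i, n, i):
--                 if spf[j] == j:
--                     spf[j] = i
--
--     omega = [0] * (n if n > 0 else 0)
--     for i in range(2, n):
--         omega[i] = omega[i // spf[i]] + 1
--
--     total = 0
--     for i in range(max(a, 2), n):
--         total += omega[i]
--     return total
-- ===== Notes on version B (the rewrite author's own statement) =====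
-- stated objective: alternative
-- what changed: The per-number while-loop factorization over [a,b] is replaced by a single incremental DP pass omega[i] = omega[i//spf[i]] + 1 over the sieve followed by a direct sum, so no number is ever re-factorized.
import Mathlib
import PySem

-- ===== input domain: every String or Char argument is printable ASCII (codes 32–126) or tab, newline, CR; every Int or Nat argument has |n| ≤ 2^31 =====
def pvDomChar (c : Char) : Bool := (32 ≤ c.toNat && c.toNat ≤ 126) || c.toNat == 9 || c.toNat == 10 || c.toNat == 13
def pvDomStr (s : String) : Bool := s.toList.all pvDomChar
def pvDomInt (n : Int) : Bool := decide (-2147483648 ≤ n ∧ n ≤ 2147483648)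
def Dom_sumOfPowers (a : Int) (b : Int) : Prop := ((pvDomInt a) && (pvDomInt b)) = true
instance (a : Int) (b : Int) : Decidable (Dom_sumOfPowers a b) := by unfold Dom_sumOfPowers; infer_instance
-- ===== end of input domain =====

-- B replaces A's per-number while-loop factorization by one incremental DP pass
-- omega[i] = omega[i // spf[i]] + 1 over the same sieve (objective: alternative algorithm).

-- ===== PORT A =====
-- shared sieve helper: this block of Python (the spf sieve) is line-for-line identical in A and B
def pvBuildSpf (b : Int) : List Int :=
  let spf := PySem.List.pyRange 0 (b+1) 1
  (PySem.List.pyRange 2 (b+1) 1).foldl (fun spf i =>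
    if PySem.List.pyGetD spf i 0 = i then
      (PySem.List.pyRange (i*i) (b+1) i).foldl (fun spf j =>
        if PySem.List.pyGetD spf j 0 = j then PySem.List.pySetD spf j i else spf) spf
    else spf) spf

-- A's 'while i > 1: cnt += 1; i //= spf[i]' (fuel-guarded; fuel i.toNat always suffices, proved below)
def pvCount (spf : List Int) : Nat → Int → Int → Int
  | 0, _, cnt => cnt
  | fuel+1, i, cnt =>
    if 1 < i then
      pvCount spf fuel (PySem.Int.floordiv i (PySem.List.pyGetD spf i 0)) (cnt + 1)
    else cnt

def sumOfPowers (a : Int) (b : Int) : Int :=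
  let spf := pvBuildSpf b
  (PySem.List.pyRange a (b+1) 1).foldl (fun ans i => ans + pvCount spf i.toNat i 0) 0

-- ===== PORT B =====
def sumOfPowers_alt (a : Int) (b : Int) : Int :=
  let spf := pvBuildSpf b
  let om := (PySem.List.pyRange 2 (b+1) 1).foldl (fun om i =>
      PySem.List.pySetD om i
        (PySem.List.pyGetD om (PySem.Int.floordiv i (PySem.List.pyGetD spf i 0)) 0 + 1))
    (List.replicate (b+1).toNat 0)
  (PySem.List.pyRange (max a 2) (b+1) 1).foldl (fun t i => t + PySem.List.pyGetD om i 0) 0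

-- ===== PRECONDITION & SPEC =====
def Spec_sumOfPowers (a : Int) (b : Int) (out : Int) : Prop := out = sumOfPowers_alt a b
instance (a : Int) (b : Int) (out : Int) : Decidable (Spec_sumOfPowers a b out) := by unfold Spec_sumOfPowers; infer_instance

-- ===== CLAIM (what is proved, stated in full; the proofs are below) =====
def Claim_equal_sumOfPowers : Prop := ∀ (a : Int) (b : Int), Dom_sumOfPowers a b → Spec_sumOfPowers a b (sumOfPowers a b)

-- ===== LEMMAS AND PROOFS =====

-- cnt is a pure accumulator
lemma pvCount_cnt (spf : List Int) : ∀ (f : Nat) (i cnt : Int),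
    pvCount spf f i cnt = cnt + pvCount spf f i 0 := by
  intro f
  induction f with
  | zero => intro i cnt; simp [pvCount]
  | succ f ih =>
    intro i cnt
    by_cases h : 1 < i
    · simp only [pvCount, if_pos h]
      rw [ih _ (cnt + 1), ih _ (0 + 1)]
      ring
    · simp [pvCount, h]

lemma pvCount_le_one (spf : List Int) (f : Nat) (i cnt : Int) (h : ¬ 1 < i) :
    pvCount spf f i cnt = cnt := by
  cases f with
  | zero => simp [pvCount]
  | succ f => simp [pvCount, h]

lemma pvCount_pos (spf : List Int) (f : Nat) (hf : 1 ≤ f) (i cnt : Int) (h : 1 < i) :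
    pvCount spf f i cnt
      = pvCount spf (f - 1) (PySem.Int.floordiv i (PySem.List.pyGetD spf i 0)) (cnt + 1) := by
  obtain ⟨f', rfl⟩ : ∃ f', f = f' + 1 := ⟨f - 1, by omega⟩
  simp [pvCount, h]

-- the property of the sieve array the counting loop needs
def SpfGood (b : Int) (spf : List Int) : Prop :=
  spf.length = (b+1).toNat ∧
  ∀ k : Nat, 2 ≤ k → k < (b+1).toNat →
    2 ≤ spf.getD k 0 ∧ spf.getD k 0 ∣ (k : Int) ∧ spf.getD k 0 ≤ (k : Int)

-- invariant maintained by the sieve's writes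
def SpfInv (b : Int) (spf : List Int) : Prop :=
  spf.length = (b+1).toNat ∧
  ∀ k : Nat, k < spf.length →
    spf.getD k 0 = (k : Int) ∨
      (2 ≤ spf.getD k 0 ∧ spf.getD k 0 ∣ (k : Int) ∧ spf.getD k 0 ≤ (k : Int))

lemma getD_set_self (xs : List Int) (n : Nat) (v : Int) (h : n < xs.length) :
    (xs.set n v).getD n 0 = v := by
  simp [List.getD_eq_getElem?_getD, h]

lemma getD_set_ne (xs : List Int) (n m : Nat) (v : Int) (h : n ≠ m) :
    (xs.set n v).getD m 0 = xs.getD m 0 := by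
  simp [List.getD_eq_getElem?_getD, h]

lemma spfInv_step (b : Int) (spf : List Int) (hI : SpfInv b spf) (v j : Int)
    (hv2 : 2 ≤ v) (hdvd : v ∣ j) (hle : v ≤ j) (hj : 0 ≤ j) :
    SpfInv b (PySem.List.pySetD spf j v) := by
  obtain ⟨hlen, hk⟩ := hI
  rw [PySem.List.pySetD_of_nonneg spf v hj]
  constructor
  · simpa using hlen
  · intro k hklen
    rw [List.length_set] at hklen
    by_cases hkj : j.toNat = k
    · subst hkj
      right
      rw [getD_set_self _ _ _ hklen]
      have hjk : ((j.toNat : Nat) : Int) = j := by omega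
      rw [hjk]
      exact ⟨hv2, hdvd, hle⟩
    · rw [getD_set_ne _ _ _ _ hkj]
      exact hk k hklen

lemma spfInv_build (b : Int) : SpfInv b (pvBuildSpf b) := by
  unfold pvBuildSpf
  have hinit : SpfInv b (PySem.List.pyRange 0 (b+1) 1) := by
    constructor
    · simp [PySem.List.length_pyRange_one]
    · intro k hk
      left
      rw [List.getD_eq_getElem _ _ hk, PySem.List.getElem_pyRange_one]
      simp
  refine List.foldlRecOn _ _ hinit ?_
  intro spf hspf i hi
  by_cases hcond : PySem.List.pyGetD spf i 0 = i
  · simp only [if_pos hcond]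
    refine List.foldlRecOn _ _ hspf ?_
    intro spf' hspf' j hj
    have hi2 : 2 ≤ i := (PySem.List.mem_pyRange_one.mp hi).1
    have hjmem := (PySem.List.mem_pyRange_iff_of_pos (by omega) j).mp hj
    obtain ⟨hj1, hj2, hj3⟩ := hjmem
    have hdvd : i ∣ j := by
      obtain ⟨c, hc⟩ := hj3
      exact ⟨i + c, by linarith [hc]⟩
    have hii : i ≤ i * i := by nlinarith
    by_cases hc2 : PySem.List.pyGetD spf' j 0 = j
    · simp only [if_pos hc2]
      exact spfInv_step b spf' hspf' i j hi2 hdvd (by omega) (by omega)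
    · simpa [hc2] using hspf'
  · simpa [hcond] using hspf

lemma spf_good (b : Int) : SpfGood b (pvBuildSpf b) := by
  obtain ⟨hlen, hk⟩ := spfInv_build b
  refine ⟨hlen, ?_⟩
  intro k hk2 hkN
  rcases hk k (by omega) with h | h
  · rw [h]
    exact ⟨by exact_mod_cast hk2, dvd_refl _, le_refl _⟩
  · exact h

-- with a good sieve, the counting loop's value does not depend on the fuel once fuel ≥ i
lemma pvCount_fuel (b : Int) (spf : List Int) (hg : SpfGood b spf) :
    ∀ k : Nat, k < (b+1).toNat → ∀ f : Nat, k ≤ f → ∀ cnt : Int,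
      pvCount spf f (k : Int) cnt = pvCount spf k (k : Int) cnt := by
  intro k
  induction k using Nat.strong_induction_on with
  | _ k ih =>
    intro hkN f hf cnt
    by_cases hk2 : 2 ≤ k
    · -- one real step
      obtain ⟨hlen, hgood⟩ := hg
      obtain ⟨hs2, hsdvd, hsle⟩ := hgood k hk2 hkN
      set v := spf.getD k 0 with hv
      have hvnat : v = ((v.toNat : Nat) : Int) := by omega
      have hget : PySem.List.pyGetD spf (k : Int) 0 = v := by
        simp [PySem.List.pyGetD_natCast, hv]
      have hq : PySem.Int.floordiv (k : Int) v = ((k / v.toNat : Nat) : Int) := by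
        rw [hvnat]; exact PySem.Int.floordiv_natCast k v.toNat
      set q := k / v.toNat with hqdef
      have hqlt : q < k := Nat.div_lt_self (by omega) (by omega)
      have h1k : (1 : Int) < (k : Int) := by exact_mod_cast hk2
      rw [pvCount_pos spf f (by omega) _ cnt h1k,
          pvCount_pos spf k (by omega) _ cnt h1k, hget, hq,
          ih q hqlt (by omega) (f - 1) (by omega),
          ih q hqlt (by omega) (k - 1) (by omega)]
    · -- k ≤ 1: both sides return cnt
      have h1 : ¬ (1 : Int) < (k : Int) := by
        intro h; exact hk2 (by exact_mod_cast h)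
      rw [pvCount_le_one _ _ _ _ h1, pvCount_le_one _ _ _ _ h1]

-- B's DP pass, parametrized by the upper bound, for induction
def pvOmF (b : Int) (spf : List Int) (m : Int) : List Int :=
  (PySem.List.pyRange 2 m 1).foldl (fun om i =>
      PySem.List.pySetD om i
        (PySem.List.pyGetD om (PySem.Int.floordiv i (PySem.List.pyGetD spf i 0)) 0 + 1))
    (List.replicate (b+1).toNat 0)

-- characterization of the DP array after processing [2, 2+t)
def OmP (b : Int) (spf : List Int) (t : Nat) : Prop :=
  (pvOmF b spf ((2 + t : Nat) : Int)).length = (b+1).toNat ∧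
  (∀ k : Nat, k < (b+1).toNat → k < 2 + t →
      (pvOmF b spf ((2 + t : Nat) : Int)).getD k 0 = pvCount spf k (k : Int) 0) ∧
  (∀ k : Nat, k < (b+1).toNat → 2 + t ≤ k →
      (pvOmF b spf ((2 + t : Nat) : Int)).getD k 0 = 0)

lemma om_char (b : Int) (spf : List Int) (hg : SpfGood b spf) :
    ∀ t : Nat, OmP b spf t := by
  intro t
  induction t with
  | zero =>
    have h0 : pvOmF b spf ((2 + 0 : Nat) : Int) = List.replicate (b+1).toNat 0 := by
      unfold pvOmF
      rw [show ((2 + 0 : Nat) : Int) = 2 by norm_num,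
          PySem.List.pyRange_one_eq_nil (le_refl (2 : Int))]
      simp
    refine ⟨by rw [h0]; simp, ?_, ?_⟩
    · intro k hkN hk2
      rw [h0, List.getD_replicate _ (by omega)]
      have : ¬ (1 : Int) < (k : Int) := by
        intro h
        have : 1 < k := by exact_mod_cast h
        omega
      rw [pvCount_le_one _ _ _ _ this]
    · intro k hkN hk2
      rw [h0, List.getD_replicate _ (by omega)]
  | succ t ih =>
    obtain ⟨hlen, hdone, hzero⟩ := ih
    set i : Nat := 2 + t with hidef
    have hsplit : pvOmF b spf ((2 + (t+1) : Nat) : Int) =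
        PySem.List.pySetD (pvOmF b spf ((i : Nat) : Int)) ((i : Nat) : Int)
          (PySem.List.pyGetD (pvOmF b spf ((i : Nat) : Int))
            (PySem.Int.floordiv ((i : Nat) : Int)
              (PySem.List.pyGetD spf ((i : Nat) : Int) 0)) 0 + 1) := by
      unfold pvOmF
      have hcast : ((2 + (t+1) : Nat) : Int) = ((i : Nat) : Int) + 1 := by
        rw [hidef]; push_cast; ring
      rw [hcast, PySem.List.pyRange_one_succ_right (by exact_mod_cast (by omega : 2 ≤ i)),
          List.foldl_append]
      simp
    unfold OmP
    rw [show (2 + (t+1) : Nat) = i + 1 by omega] at *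
    by_cases hiN : i < (b+1).toNat
    · -- a real write at index i
      obtain ⟨hlenS, hgood⟩ := hg
      obtain ⟨hs2, hsdvd, hsle⟩ := hgood i (by omega) hiN
      set v := spf.getD i 0 with hv
      have hget : PySem.List.pyGetD spf ((i : Nat) : Int) 0 = v := by
        simp [PySem.List.pyGetD_natCast, hv]
      have hvnat : v = ((v.toNat : Nat) : Int) := by omega
      have hq : PySem.Int.floordiv ((i : Nat) : Int) v = ((i / v.toNat : Nat) : Int) := by
        rw [hvnat]; exact PySem.Int.floordiv_natCast i v.toNat
      set q := i / v.toNat with hqdef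
      have hqlt : q < i := Nat.div_lt_self (by omega) (by omega)
      have hval : (pvOmF b spf ((i : Nat) : Int)).getD q 0 = pvCount spf q (q : Int) 0 :=
        hdone q (by omega) (by omega)
      have h1i : (1 : Int) < ((i : Nat) : Int) := by exact_mod_cast (by omega : 1 < i)
      have hstep : pvCount spf i ((i : Nat) : Int) 0
          = pvCount spf q ((q : Nat) : Int) 0 + 1 := by
        rw [pvCount_pos spf i (by omega) _ 0 h1i, hget, hq,
            pvCount_cnt, pvCount_fuel b spf ⟨hlenS, hgood⟩ q (by omega) (i - 1) (by omega)]
        ring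
      rw [hsplit, hget, hq]
      rw [PySem.List.pySetD_of_nonneg _ _ (by positivity)]
      have htoNat : ((i : Nat) : Int).toNat = i := by simp
      rw [htoNat]
      refine ⟨?_, ?_, ?_⟩
      · rw [List.length_set]; exact hlen
      · intro k hkN hk2
        by_cases hk : k = i
        · subst hk
          rw [getD_set_self _ _ _ (by omega)]
          rw [PySem.List.pyGetD_natCast, hval, hstep]
        · rw [getD_set_ne _ _ _ _ (by omega)]
          exact hdone k hkN (by omega)
      · intro k hkN hk2
        rw [getD_set_ne _ _ _ _ (by omega)]
        exact hzero k hkN (by omega)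
    · -- index out of range: the write is a no-op
      have hnoop : pvOmF b spf (((i + 1 : Nat) : Nat) : Int) = pvOmF b spf ((i : Nat) : Int) := by
        rw [hsplit, PySem.List.pySetD_of_nonneg _ _ (by positivity),
            List.set_eq_of_length_le]
        rw [hlen]
        simp
        omega
      rw [hnoop]
      refine ⟨hlen, ?_, ?_⟩
      · intro k hkN hk2
        exact hdone k hkN (by omega)
      · intro k hkN hk2
        exact hzero k hkN (by omega)

-- ===== VERDICT (by name: the statement is the Claim_ definition above) =====
theorem sumOfPowers_spec : Claim_equal_sumOfPowers := by
  unfold Claim_equal_sumOfPowers Spec_sumOfPowers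
  intro a b _
  have hg := spf_good b
  set spf := pvBuildSpf b with hspf
  have hA : sumOfPowers a b
      = ((PySem.List.pyRange a (b+1) 1).map (fun i => pvCount spf i.toNat i 0)).sum := by
    rw [show sumOfPowers a b
        = (PySem.List.pyRange a (b+1) 1).foldl (fun ans i => ans + pvCount spf i.toNat i 0) 0
      from rfl, PySem.List.foldl_add]
    ring
  have hB : sumOfPowers_alt a b
      = ((PySem.List.pyRange (max a 2) (b+1) 1).map
          (fun i => PySem.List.pyGetD (pvOmF b spf (b+1)) i 0)).sum := by
    rw [show sumOfPowers_alt a b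
        = (PySem.List.pyRange (max a 2) (b+1) 1).foldl
            (fun t i => t + PySem.List.pyGetD (pvOmF b spf (b+1)) i 0) 0
      from rfl, PySem.List.foldl_add]
    ring
  rw [hA, hB]
  by_cases hb : b ≤ 1
  · -- everything is empty / zero
    have hBnil : PySem.List.pyRange (max a 2) (b+1) 1 = [] :=
      PySem.List.pyRange_one_eq_nil (by omega)
    rw [hBnil]
    simp only [List.map_nil, List.sum_nil]
    apply List.sum_eq_zero
    intro x hx
    obtain ⟨i, hi, hix⟩ := List.mem_map.mp hx
    have := PySem.List.mem_pyRange_one.mp hi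
    rw [← hix, pvCount_le_one _ _ _ _ (by omega)]
  · -- b ≥ 2
    have hN2 : 2 ≤ (b+1).toNat := by omega
    set t : Nat := (b+1).toNat - 2 with ht
    have hcastN : ((2 + t : Nat) : Int) = b + 1 := by omega
    obtain ⟨hlen, hdone, _⟩ := om_char b spf hg t
    rw [hcastN] at hdone
    have key : ∀ i : Int, 2 ≤ i → i < b + 1 →
        pvCount spf i.toNat i 0 = PySem.List.pyGetD (pvOmF b spf (b+1)) i 0 := by
      intro i h2 hlt
      have hi0 : i = ((i.toNat : Nat) : Int) := by omega
      rw [hi0, PySem.List.pyGetD_natCast,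
          hdone i.toNat (by omega) (by omega)]
      have hfix : ((i.toNat : Nat) : Int).toNat = i.toNat := by omega
      rw [hfix]
    by_cases ha : 2 ≤ a
    · have hmax : max a 2 = a := by omega
      rw [hmax]
      apply congrArg
      apply List.map_congr_left
      intro i hi
      have := PySem.List.mem_pyRange_one.mp hi
      exact key i (by omega) (by omega)
    · have hmax : max a 2 = 2 := by omega
      rw [hmax, PySem.List.pyRange_one_append a 2 (b+1) (by omega) (by omega),
          List.map_append, List.sum_append]
      have hzero : ((PySem.List.pyRange a 2 1).map (fun i => pvCount spf i.toNat i 0)).sum = 0 := by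
        apply List.sum_eq_zero
        intro x hx
        obtain ⟨i, hi, hix⟩ := List.mem_map.mp hx
        have := PySem.List.mem_pyRange_one.mp hi
        rw [← hix, pvCount_le_one _ _ _ _ (by omega)]
      rw [hzero, zero_add]
      apply congrArg
      apply List.map_congr_left
      intro i hi
      have := PySem.List.mem_pyRange_one.mp hi
      exact key i (by omega) (by omega)
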